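-- pv_equiv track=rewrite | github.com/mozilla-services/pulsetranslator | pulsetranslator/messageparams.py | guess_platform
-- ===== SOURCE A (Python) =====
-- def guess_platform(builder):
--     for platform in sorted(platforms.keys(), reverse=True):
--         if platform in builder:
--             return platform
--
--     for key in platforms:
--         for os in platforms[key]:
--             if os in builder:
--                 return os
--
-- platforms = {
--     'emulator': ['emulator', 'ubuntu64_vm-b2g-emulator'],
--     'emulator-kk': ['emulator-kk'],
--     'emulator-jb': ['emulator-jb'],
--     'linux64-asan': ['linux64-asan', 'ubuntu64-asan_vm', 'ubuntu64-asan_vm_lnx_large'],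
--     'linux32_gecko': ['linux32_gecko', 'ubuntu32_vm-b2gdt'],
--     'linux64_gecko': ['linux64_gecko', 'ubuntu64_vm-b2gdt'],
--     'linux64-rpm': ['fedora64'],
--     'linux64': ['fedora64', 'ubuntu64', 'ubuntu64_hw', 'ubuntu64_vm', 'ubuntu64_vm_lnx_large'],
--     'linux64-mulet': ['linux64-mulet', 'ubuntu64_vm-mulet'],
--     'linuxqt': ['fedora'],
--     'linux-rpm': ['fedora'],
--     'linux': ['fedora', 'linux', 'ubuntu32', 'ubuntu32_vm', 'ubuntu32_hw'],
--     'win32': ['xp', 'xp_ix', 'win7', 'win8', 'win7-ix', 'xp-ix', 'win7_ix', 'win7_vm', 'win7_vm_gfx'],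
--     'win32_gecko': ['win32_gecko'],
--     'win32-mulet': ['win32-mulet'],
--     'win64': ['w764', 'win8_64'],
--     'macosx64': ['macosx64', 'snowleopard', 'leopard', 'lion', 'mountainlion', 'yosemite'],
--     'macosx64_gecko': ['macosx64_gecko', 'mountainlion-b2gdt'],
--     'macosx64-mulet': ['macosx64-mulet'],
--     'macosx': ['macosx', 'leopard'],
--     'android-armv6': ['ubuntu64_vm_armv6_mobile', 'ubuntu64_vm_armv6_large'],
--     'android-x86': ['android-x86', 'ubuntu64_hw'],
--     'android': ['panda_android', 'ubuntu64_vm_mobile', 'ubuntu64_vm_large'],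
--     'android-api-9': ['ubuntu64_vm_mobile', 'ubuntu64_vm_large'],
--     'android-api-10': ['panda_android'],
--     'android-api-11': ['panda_android', 'ubuntu64_vm_armv7_large', 'ubuntu64_vm_armv7_mobile'],
--     'ics_armv7a_gecko': ['ubuntu64-b2g'],
-- }
-- ===== SOURCE B (Python) =====
-- # B: multi-pattern matching driven by the text: scan the builder position by
-- # position, use a first-character index into the flat priority list, and keep
-- # the lowest priority rank matched, instead of testing each candidate with 'in'
-- # in priority order.
-- platforms = {
--     'emulator': ['emulator', 'ubuntu64_vm-b2g-emulator'],
--     'emulator-kk': ['emulator-kk'],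
--     'emulator-jb': ['emulator-jb'],
--     'linux64-asan': ['linux64-asan', 'ubuntu64-asan_vm', 'ubuntu64-asan_vm_lnx_large'],
--     'linux32_gecko': ['linux32_gecko', 'ubuntu32_vm-b2gdt'],
--     'linux64_gecko': ['linux64_gecko', 'ubuntu64_vm-b2gdt'],
--     'linux64-rpm': ['fedora64'],
--     'linux64': ['fedora64', 'ubuntu64', 'ubuntu64_hw', 'ubuntu64_vm', 'ubuntu64_vm_lnx_large'],
--     'linux64-mulet': ['linux64-mulet', 'ubuntu64_vm-mulet'],
--     'linuxqt': ['fedora'],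
--     'linux-rpm': ['fedora'],
--     'linux': ['fedora', 'linux', 'ubuntu32', 'ubuntu32_vm', 'ubuntu32_hw'],
--     'win32': ['xp', 'xp_ix', 'win7', 'win8', 'win7-ix', 'xp-ix', 'win7_ix', 'win7_vm', 'win7_vm_gfx'],
--     'win32_gecko': ['win32_gecko'],
--     'win32-mulet': ['win32-mulet'],
--     'win64': ['w764', 'win8_64'],
--     'macosx64': ['macosx64', 'snowleopard', 'leopard', 'lion', 'mountainlion', 'yosemite'],
--     'macosx64_gecko': ['macosx64_gecko', 'mountainlion-b2gdt'],
--     'macosx64-mulet': ['macosx64-mulet'],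
--     'macosx': ['macosx', 'leopard'],
--     'android-armv6': ['ubuntu64_vm_armv6_mobile', 'ubuntu64_vm_armv6_large'],
--     'android-x86': ['android-x86', 'ubuntu64_hw'],
--     'android': ['panda_android', 'ubuntu64_vm_mobile', 'ubuntu64_vm_large'],
--     'android-api-9': ['ubuntu64_vm_mobile', 'ubuntu64_vm_large'],
--     'android-api-10': ['panda_android'],
--     'android-api-11': ['panda_android', 'ubuntu64_vm_armv7_large', 'ubuntu64_vm_armv7_mobile'],
--     'ics_armv7a_gecko': ['ubuntu64-b2g'],
-- }
--
-- # candidate priority order: reverse-sorted keys, then every value list in dict order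
-- _prior = sorted(platforms, reverse=True)
-- for _oses in platforms.values():
--     _prior.extend(_oses)
--
-- # first-character index: _buckets[c] lists the (rank, candidate) pairs whose
-- # candidate starts with c, in priority order
-- _buckets = {}
-- for _rank, _cand in enumerate(_prior):
--     _buckets.setdefault(_cand[0], []).append((_rank, _cand))
--
-- def guess_platform(builder):
--     best = None
--     for i in range(len(builder)):
--         for rank, cand in _buckets.get(builder[i], ()):
--             if builder.startswith(cand, i):
--                 if best is None or rank < best:
--                     best = rank
--                 break
--     return _prior[best] if best is not None else None
-- ===== Notes on version B (the rewrite author's own statement) =====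
-- stated objective: alternative
-- what changed: B replaces A's candidate-major search (substring test 'in' per candidate, sorted keys then nested value lists) with a text-major multi-pattern scan: it walks the builder string position by position, looks up the candidates that can start there in a first-character index built once from the flat priority list, and keeps the lowest priority rank matched, returning that candidate at the end.
import Mathlib
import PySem

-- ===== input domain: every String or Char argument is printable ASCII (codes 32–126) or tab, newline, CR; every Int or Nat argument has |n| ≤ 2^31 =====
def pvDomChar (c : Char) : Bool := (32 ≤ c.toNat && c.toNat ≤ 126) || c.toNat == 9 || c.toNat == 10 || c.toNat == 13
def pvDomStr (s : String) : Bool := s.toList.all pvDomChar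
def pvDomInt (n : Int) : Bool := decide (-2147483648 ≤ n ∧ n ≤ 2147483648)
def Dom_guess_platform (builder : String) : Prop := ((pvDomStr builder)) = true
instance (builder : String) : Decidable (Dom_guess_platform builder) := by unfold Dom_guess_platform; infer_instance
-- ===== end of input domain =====

-- B replaces A's candidate-major search (substring test per candidate in priority order) by a
-- text-major multi-pattern scan: it walks the builder position by position, prefix-matches the
-- candidates listed under the current character in a first-character index built once from the
-- flat priority list, and keeps the lowest priority rank matched.

-- ===== PORT A =====
def platforms : PySem.Dict String (List String) := PySem.Dict.ofList [
  ("emulator", ["emulator", "ubuntu64_vm-b2g-emulator"]),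
  ("emulator-kk", ["emulator-kk"]),
  ("emulator-jb", ["emulator-jb"]),
  ("linux64-asan", ["linux64-asan", "ubuntu64-asan_vm", "ubuntu64-asan_vm_lnx_large"]),
  ("linux32_gecko", ["linux32_gecko", "ubuntu32_vm-b2gdt"]),
  ("linux64_gecko", ["linux64_gecko", "ubuntu64_vm-b2gdt"]),
  ("linux64-rpm", ["fedora64"]),
  ("linux64", ["fedora64", "ubuntu64", "ubuntu64_hw", "ubuntu64_vm", "ubuntu64_vm_lnx_large"]),
  ("linux64-mulet", ["linux64-mulet", "ubuntu64_vm-mulet"]),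
  ("linuxqt", ["fedora"]),
  ("linux-rpm", ["fedora"]),
  ("linux", ["fedora", "linux", "ubuntu32", "ubuntu32_vm", "ubuntu32_hw"]),
  ("win32", ["xp", "xp_ix", "win7", "win8", "win7-ix", "xp-ix", "win7_ix", "win7_vm", "win7_vm_gfx"]),
  ("win32_gecko", ["win32_gecko"]),
  ("win32-mulet", ["win32-mulet"]),
  ("win64", ["w764", "win8_64"]),
  ("macosx64", ["macosx64", "snowleopard", "leopard", "lion", "mountainlion", "yosemite"]),
  ("macosx64_gecko", ["macosx64_gecko", "mountainlion-b2gdt"]),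
  ("macosx64-mulet", ["macosx64-mulet"]),
  ("macosx", ["macosx", "leopard"]),
  ("android-armv6", ["ubuntu64_vm_armv6_mobile", "ubuntu64_vm_armv6_large"]),
  ("android-x86", ["android-x86", "ubuntu64_hw"]),
  ("android", ["panda_android", "ubuntu64_vm_mobile", "ubuntu64_vm_large"]),
  ("android-api-9", ["ubuntu64_vm_mobile", "ubuntu64_vm_large"]),
  ("android-api-10", ["panda_android"]),
  ("android-api-11", ["panda_android", "ubuntu64_vm_armv7_large", "ubuntu64_vm_armv7_mobile"]),
  ("ics_armv7a_gecko", ["ubuntu64-b2g"])]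

-- first loop of A: 'for platform in sorted(platforms.keys(), reverse=True): if platform in builder: return platform'
def loopKeys : List String → String → Option String
  | [], _ => none
  | p :: rest, b => if PySem.Str.isIn p b then some p else loopKeys rest b

-- inner loop of A: 'for os in platforms[key]: if os in builder: return os'
def loopOses : List String → String → Option String
  | [], _ => none
  | o :: rest, b => if PySem.Str.isIn o b then some o else loopOses rest b

-- outer second loop of A: 'for key in platforms: …'
def loopDict : List String → String → Option String
  | [], _ => none
  | k :: rest, b =>
      match loopOses (platforms.getD k []) b with
      | some o => some o
      | none => loopDict rest b

def guess_platform (builder : String) : Option String :=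
  match loopKeys (PySem.List.sorted platforms.keys (fun x => x) true) builder with
  | some p => some p
  | none => loopDict platforms.keys builder

-- ===== PORT B =====
-- the module-level flat priority list _prior: sorted(platforms, reverse=True) then each value list extended
def candidates : List String :=
  platforms.values.foldl (fun acc oses => acc ++ oses)
    (PySem.List.sorted platforms.keys (fun x => x) true)

-- inner loop of B: 'for rank, cand in enumerate(_prior): if tail.startswith(cand): (keep lower rank); break'
def bestAt : List (Int × String) → String → Option Int → Option Int
  | [], _, best => best
  | (rank, cand) :: rest, tail, best =>
      if PySem.Str.startswith tail cand then
        match best with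
        | none => some rank
        | some b => if rank < b then some rank else some b
      else bestAt rest tail best

-- '_buckets': first-character index, '_buckets.setdefault(_cand[0], []).append((_rank, _cand))'
def buckets : PySem.Dict Char (List (Int × String)) :=
  (PySem.List.enumerate candidates 0).foldl
    (fun d rc =>
      match PySem.Str.pyGet? rc.2 0 with   -- '_cand[0]'; every candidate is nonempty, so this never raises
      | some c0 => d.insert c0 (d.getD c0 [] ++ [rc])
      | none => d)
    (PySem.Dict.ofList [])

def guess_platform_alt (builder : String) : Option String :=
  match
    -- 'best' after the outer loop over range(len(builder))
    (PySem.List.pyRange 0 (PySem.Str.len builder) 1).foldl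
      (fun best i =>
        bestAt
          (match PySem.Str.pyGet? builder i with  -- '_buckets.get(builder[i], ())'; i is in range, so this never raises
           | some ch => buckets.getD ch []
           | none => [])
          -- 'builder.startswith(cand, i)' is tested by bestAt on the i-suffix: exact for 0 <= i <= len(builder)
          (PySem.Str.slice builder (some i) none)
          best)
      none
  with
  | none => none
  | some b => PySem.List.pyGet? candidates b  -- '_prior[best]': best is always a valid index, so this is 'some (_prior[best])'

-- ===== PRECONDITION & SPEC =====
def Spec_guess_platform (builder : String) (out : Option String) : Prop := out = guess_platform_alt builder
instance (builder : String) (out : Option String) : Decidable (Spec_guess_platform builder out) := by unfold Spec_guess_platform; infer_instance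

-- ===== CLAIM (what is proved, stated in full; the proofs are below) =====
def Claim_equal_guess_platform : Prop := ∀ (builder : String), Dom_guess_platform builder → Spec_guess_platform builder (guess_platform builder)

-- ===== LEMMAS AND PROOFS =====

-- ---- A-side: A is find? over the flat priority list ----

theorem loopKeys_eq_find? (l : List String) (b : String) :
    loopKeys l b = l.find? (fun c => PySem.Str.isIn c b) := by
  induction l with
  | nil => rfl
  | cons p rest ih =>
      simp only [loopKeys, List.find?, PySem.Str.isIn]
      rcases Bool.eq_false_or_eq_true (PySem.Chars.isIn p.toList b.toList) with h | h <;>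
        simp only [h] <;> simp [ih]

theorem loopOses_eq_find? (l : List String) (b : String) :
    loopOses l b = l.find? (fun c => PySem.Str.isIn c b) := by
  induction l with
  | nil => rfl
  | cons p rest ih =>
      simp only [loopOses, List.find?, PySem.Str.isIn]
      rcases Bool.eq_false_or_eq_true (PySem.Chars.isIn p.toList b.toList) with h | h <;>
        simp only [h] <;> simp [ih]

theorem loopDict_eq_find? (ks : List String) (b : String) :
    loopDict ks b =
      (ks.flatMap (fun k => platforms.getD k [])).find? (fun c => PySem.Str.isIn c b) := by
  induction ks with
  | nil => rfl
  | cons k rest ih =>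
      simp only [loopDict, List.flatMap_cons, List.find?_append, loopOses_eq_find?, ih]
      cases (platforms.getD k []).find? (fun c => PySem.Str.isIn c b) <;> rfl

-- B's flat list is exactly A's search order: sorted keys ++ all value lists
theorem candidates_eq :
    candidates =
      PySem.List.sorted platforms.keys (fun x => x) true ++
        platforms.keys.flatMap (fun k => platforms.getD k []) := by
  unfold candidates
  rw [PySem.List.foldl_append_eq_flatten]
  congr 1

theorem A_eq_find? (b : String) :
    guess_platform b = candidates.find? (fun c => PySem.Str.isIn c b) := by
  unfold guess_platform
  rw [candidates_eq, List.find?_append, loopKeys_eq_find?, loopDict_eq_find?]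
  cases (PySem.List.sorted platforms.keys (fun x => x) true).find?
      (fun c => PySem.Str.isIn c b) <;> rfl

-- ---- B-side characterization ----

-- how one inner-loop update combines the running best with the rank found at a position
def omerge (best : Option Int) : Option Int → Option Int
  | none => best
  | some r => match best with
      | none => some r
      | some b => if r < b then some r else some b

theorem bestAt_spec (l : List (Int × String)) (tail : String) (best : Option Int) :
    bestAt l tail best =
      omerge best ((l.find? (fun rc => PySem.Str.startswith tail rc.2)).map (·.1)) := by
  induction l with
  | nil => rfl
  | cons rc rest ih =>
      obtain ⟨rank, cand⟩ := rc
      simp only [bestAt, List.find?, PySem.Str.startswith]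
      rcases Bool.eq_false_or_eq_true (PySem.Chars.startswith tail.toList cand.toList) with h | h <;>
        simp only [h] <;> simp [ih, omerge, PySem.Str.startswith]

-- the rank of the first match in an enumerated list is the first matching index, shifted
theorem enum_find?_fst (xs : List String) (s : Int) (p : String → Bool) :
    ((PySem.List.enumerate xs s).find? (fun rc => p rc.2)).map (·.1)
      = (xs.findIdx? p).map (fun (k : Nat) => s + (k : Int)) := by
  induction xs generalizing s with
  | nil => rfl
  | cons x rest ih =>
      rw [PySem.List.enumerate_cons]
      simp only [List.find?, List.findIdx?_cons]
      cases h : p x with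
      | true => simp
      | false =>
          simp only [Bool.false_eq_true, if_false]
          rw [ih (s + 1)]
          cases rest.findIdx? p with
          | none => rfl
          | some k => simp; ring

theorem omerge_some_some (b r : Int) : omerge (some b) (some r) = some (min b r) := by
  simp only [omerge]
  rcases lt_or_ge r b with h | h
  · rw [if_pos h, min_eq_right (le_of_lt h)]
  · rw [if_neg (not_lt.mpr h), min_eq_left h]

theorem foldl_omerge_some (f : Nat → Option Int) (xs : List Nat) :
    ∀ b : Int, xs.foldl (fun acc x => omerge acc (f x)) (some b)
      = some ((xs.filterMap f).foldl min b) := by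
  induction xs with
  | nil => intro b; rfl
  | cons x rest ih =>
      intro b
      cases hf : f x with
      | none =>
          simp only [List.foldl_cons, List.filterMap_cons, hf]
          exact ih b
      | some r =>
          simp only [List.foldl_cons, List.filterMap_cons, hf]
          rw [omerge_some_some, ih (min b r)]

theorem foldl_omerge_none (f : Nat → Option Int) (xs : List Nat) :
    xs.foldl (fun acc x => omerge acc (f x)) none = (xs.filterMap f).min? := by
  induction xs with
  | nil => rfl
  | cons x rest ih =>
      cases hf : f x with
      | none =>
          simp only [List.foldl_cons, List.filterMap_cons, hf]
          exact ih
      | some r =>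
          simp only [List.foldl_cons, List.filterMap_cons, hf]
          rw [show omerge none (some r) = some r from rfl, foldl_omerge_some,
            List.min?_cons']

theorem min?_map_natCast (l : List Nat) :
    (l.map (fun (k : Nat) => (k : Int))).min? = l.min?.map (fun (k : Nat) => (k : Int)) := by
  cases l with
  | nil => rfl
  | cons a t =>
      rw [List.map_cons, List.min?_cons', List.min?_cons', Option.map_some]
      congr 1
      induction t generalizing a with
      | nil => rfl
      | cons x rest ih =>
          rw [List.map_cons, List.foldl_cons, List.foldl_cons, ← Nat.cast_min, ih]

-- the per-position first matching rank, over the character list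
def fmN (B : List Char) (i : Nat) : Option Nat :=
  candidates.findIdx? (fun c => PySem.Chars.startswith (B.drop i) c.toList)

theorem cand_nonempty : ∀ c ∈ candidates, c.toList ≠ [] := by
  have hk : (platforms.keys.all fun c => !c.toList.isEmpty) = true := by decide
  have hv : ((platforms.keys.flatMap (fun k => platforms.getD k [])).all
      fun c => !c.toList.isEmpty) = true := by decide
  intro c hc
  rw [candidates_eq, List.mem_append, PySem.List.mem_sorted] at hc
  have hne : (!c.toList.isEmpty) = true := by
    rcases hc with h | h
    · exact List.all_eq_true.mp hk c h
    · exact List.all_eq_true.mp hv c h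
  simpa [List.isEmpty_iff] using hne

theorem startswith_to_isIn (B : List Char) (i : Nat) (c : String)
    (h : PySem.Chars.startswith (B.drop i) c.toList = true) :
    PySem.Chars.isIn c.toList B = true := by
  rw [← PySem.Chars.exists_prefix_drop_iff_isIn]
  exact ⟨i, (PySem.Chars.startswith_iff _ _).mp h⟩

-- CORE: the minimum over all positions of the first matching rank is the first rank occurring in B
theorem core_min (B : List Char) :
    ((List.range B.length).filterMap (fmN B)).min?
      = candidates.findIdx? (fun c => PySem.Chars.isIn c.toList B) := by
  cases hA : candidates.findIdx? (fun c => PySem.Chars.isIn c.toList B) with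
  | none =>
      have hall := List.findIdx?_eq_none_iff.mp hA
      have : (List.range B.length).filterMap (fmN B) = [] := by
        rw [List.filterMap_eq_nil_iff]
        intro i _
        rw [fmN, List.findIdx?_eq_none_iff]
        intro c hc
        cases h : PySem.Chars.startswith (List.drop i B) c.toList with
        | false => rfl
        | true => exact absurd (startswith_to_isIn B i c h) (by simp [hall c hc])
      rw [this]; rfl
  | some r0 =>
      obtain ⟨hr0, hpr0, hmin⟩ := List.findIdx?_eq_some_iff_getElem.mp hA
      rw [List.min?_eq_some_iff]
      constructor
      · -- r0 is attained at some position
        obtain ⟨j, hj⟩ := (PySem.Chars.exists_prefix_drop_iff_isIn _ _).mpr hpr0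
        have hne : candidates[r0].toList ≠ [] := cand_nonempty _ (List.getElem_mem hr0)
        have hjlt : j < B.length := by
          rcases Nat.lt_or_ge j B.length with h | h
          · exact h
          · exfalso
            have : B.drop j = [] := List.drop_eq_nil_of_le (by omega)
            rw [this] at hj
            exact hne (List.prefix_nil.mp hj)
        have hq : PySem.Chars.startswith (B.drop j) candidates[r0].toList = true :=
          (PySem.Chars.startswith_iff _ _).mpr hj
        have hsome : fmN B j = some r0 := by
          cases hf : fmN B j with
          | none =>
              exact absurd (List.findIdx?_eq_none_iff.mp hf _ (List.getElem_mem hr0))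
                (by simp [hq])
          | some r' =>
              obtain ⟨hr', hqr', hmin'⟩ := List.findIdx?_eq_some_iff_getElem.mp hf
              have h1 : ¬ r' < r0 := fun hlt =>
                (hmin r' hlt) (startswith_to_isIn B j _ hqr')
              have h2 : ¬ r0 < r' := fun hlt => (hmin' r0 hlt) hq
              have : r' = r0 := by omega
              rw [this]
        exact List.mem_filterMap.mpr ⟨j, List.mem_range.mpr hjlt, hsome⟩
      · -- r0 is a lower bound
        intro b hb
        obtain ⟨i, _, hfi⟩ := List.mem_filterMap.mp hb
        obtain ⟨hbl, hqb, _⟩ := List.findIdx?_eq_some_iff_getElem.mp hfi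
        by_contra hlt
        exact (hmin b (by omega)) (startswith_to_isIn B i _ hqb)

-- generic: find? is lookup at findIdx?
theorem find?_eq_bind_findIdx? {α : Type} (p : α → Bool) (l : List α) :
    l.find? p = (l.findIdx? p).bind (fun k => l[k]?) := by
  cases h : l.findIdx? p with
  | none =>
      show l.find? p = none
      rw [List.find?_eq_none]
      intro x hx
      simpa using (List.findIdx?_eq_none_iff.mp h) x hx
  | some k =>
      obtain ⟨hk, hpk, hm⟩ := List.findIdx?_eq_some_iff_getElem.mp h
      simp only [Option.bind_some, List.getElem?_eq_getElem hk]
      exact List.find?_eq_some_iff_getElem.mpr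
        ⟨hpk, k, hk, rfl, fun j hj => by simpa using hm j hj⟩

-- the bucket under a character collects exactly the enumerated candidates starting with it
theorem bucket_fold_getD (l : List (Int × String)) (ch : Char) :
    ∀ d : PySem.Dict Char (List (Int × String)),
    (l.foldl (fun d rc =>
        match PySem.Str.pyGet? rc.2 0 with
        | some c0 => d.insert c0 (d.getD c0 [] ++ [rc])
        | none => d) d).getD ch []
    = d.getD ch [] ++ l.filter (fun rc => rc.2.toList[0]? == some ch) := by
  induction l with
  | nil => intro d; simp
  | cons rc rest ih =>
      intro d
      have hget : PySem.Str.pyGet? rc.2 0 = rc.2.toList[0]? := by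
        rw [show (0 : Int) = ((0 : Nat) : Int) by simp, PySem.Str.pyGet?_natCast]
      cases h0 : rc.2.toList[0]? with
      | none =>
          simp only [List.foldl_cons, List.filter_cons, hget, h0]
          rw [if_neg (by simp)]
          exact ih d
      | some c0 =>
          simp only [List.foldl_cons, List.filter_cons, hget, h0]
          rw [ih (d.insert c0 (d.getD c0 [] ++ [rc])), PySem.Dict.getD_insert]
          by_cases hc : ch = c0
          · subst hc
            rw [if_pos rfl, if_pos (by simp), List.append_assoc, List.singleton_append]
          · rw [if_neg hc, if_neg (by simp [Ne.symm hc])]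

theorem buckets_getD (ch : Char) :
    buckets.getD ch []
      = (PySem.List.enumerate candidates 0).filter
          (fun rc => rc.2.toList[0]? == some ch) := by
  rw [buckets, bucket_fold_getD]
  rfl

-- filtering by a predicate implied by the search predicate does not change the first hit
theorem find?_filter_of_imp {α : Type} (p q : α → Bool) (l : List α)
    (h : ∀ x ∈ l, p x = true → q x = true) :
    (l.filter q).find? p = l.find? p := by
  induction l with
  | nil => rfl
  | cons x rest ih =>
      have ih' := ih (fun y hy => h y (List.mem_cons_of_mem _ hy))
      rw [List.filter_cons]
      by_cases hq : q x = true
      · rw [if_pos hq]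
        simp only [List.find?]
        rcases Bool.eq_false_or_eq_true (p x) with hp | hp <;> simp [hp, ih']
      · rw [if_neg hq]
        have hp : p x = false := by
          rcases Bool.eq_false_or_eq_true (p x) with hp | hp
          · exact absurd (h x List.mem_cons_self hp) hq
          · exact hp
        simp only [List.find?, hp]
        exact ih'

theorem B_eq_find? (b : String) :
    guess_platform_alt b = candidates.find? (fun c => PySem.Str.isIn c b) := by
  have hstep : ∀ (best : Option Int) (i : Nat), i < b.toList.length →
      bestAt
        (match PySem.Str.pyGet? b ((i : Nat) : Int) with
         | some ch => buckets.getD ch []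
         | none => [])
        (PySem.Str.slice b (some ((i : Nat) : Int)) none) best
        = omerge best ((fmN b.toList i).map (fun (k : Nat) => (k : Int))) := by
    intro best i hi
    have hch : PySem.Str.pyGet? b ((i : Nat) : Int) = some (b.toList[i]'hi) := by
      rw [PySem.Str.pyGet?_natCast, List.getElem?_eq_getElem hi]
    simp only [hch, buckets_getD]
    rw [bestAt_spec]
    simp only [PySem.Str.startswith_eq, PySem.Str.toList_slice,
      PySem.Chars.slice_eq_listSlice, PySem.List.slice_from_natCast, fmN]
    rw [find?_filter_of_imp _ _ _ ?_]
    · have h := enum_find?_fst candidates 0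
        (fun c => PySem.Chars.startswith (b.toList.drop i) c.toList)
      simp only [zero_add] at h
      rw [h]
    · intro rc hrc hp
      obtain ⟨k, hk, rfl⟩ := (PySem.List.mem_enumerate_iff _ _ _).mp hrc
      have hne := cand_nonempty _ (List.getElem_mem hk)
      have hpre := (PySem.Chars.startswith_iff _ _).mp hp
      have hhead : candidates[k].toList[0]? = b.toList[i]? := by
        rw [← List.head?_eq_getElem?, ← List.head?_drop]
        cases hcl : candidates[k].toList with
        | nil => exact absurd hcl hne
        | cons c cs =>
            rw [hcl] at hpre
            obtain ⟨t, ht⟩ := hpre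
            rw [← ht]
            rfl
      have : (candidates[k].toList[0]? == some (b.toList[i]'hi)) = true := by
        rw [hhead, List.getElem?_eq_getElem hi]
        simp
      exact this
  have hlen : PySem.Str.len b = ((b.toList.length : Nat) : Int) := PySem.Str.len_eq b
  have hfold :
      (PySem.List.pyRange 0 (PySem.Str.len b) 1).foldl
        (fun best i =>
          bestAt
            (match PySem.Str.pyGet? b i with
             | some ch => buckets.getD ch []
             | none => [])
            (PySem.Str.slice b (some i) none)
            best)
        none
      = (candidates.findIdx? (fun c => PySem.Chars.isIn c.toList b.toList)).map
          (fun (k : Nat) => (k : Int)) := by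
    rw [hlen, PySem.List.pyRange_zero_natCast, List.foldl_map]
    rw [PySem.List.foldl_congr_mem _ _
      (fun best i => omerge best ((fmN b.toList i).map (fun (k : Nat) => (k : Int)))) none
      (fun acc x hx => hstep acc x (List.mem_range.mp hx))]
    rw [foldl_omerge_none, ← List.map_filterMap, min?_map_natCast, core_min]
  unfold guess_platform_alt
  rw [hfold, find?_eq_bind_findIdx?]
  have hpred : (fun c => PySem.Str.isIn c b)
      = (fun c => PySem.Chars.isIn c.toList b.toList) := by
    funext c; rw [PySem.Str.isIn_eq]
  rw [hpred]
  cases candidates.findIdx? (fun c => PySem.Chars.isIn c.toList b.toList) with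
  | none => rfl
  | some k => simp [PySem.List.pyGet?_natCast]

-- ===== VERDICT (by name: the statement is the Claim_ definition above) =====
theorem guess_platform_spec : Claim_equal_guess_platform := by
  intro builder _
  unfold Spec_guess_platform
  rw [A_eq_find?, B_eq_find?]
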